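-- pv_equiv track=rewrite | github.com/cseku170202/Spring_20_CSE-4104-D-_NWU | Group 7/Source Code/main.py | analyze_line
-- ===== SOURCE A (Python) =====
-- keywords = ["if", "else", "while", "for", "return","include","int","float"]
--
-- operators = ["+", "-", "*", "/", "=", "==", "<", ">", "<=", ">=","#"]
--
-- delimiters = ["(", ")", "{", "}", ",", ";"]
--
-- header_file=["stdio.h"]
--
-- Function= ["main", "printf", "scanf"]
--
-- def analyze_line(line):
--     tokens = []
--     current_token = ""
--
--     # Loop through each character in the line
--     for char in line:
--         # If the character is a whitespace or delimiter, add the current token to the list of tokens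
--         if char.isspace() or char in delimiters:
--             if current_token:
--                 tokens.append(current_token)
--                 current_token = ""
--
--             # If the character is a delimiter, add it to the list of tokens
--             if char in delimiters:
--                 tokens.append(char)
--         # If the character is an operator, add the current token to the list of tokens and add the operator as a separate token
--         elif char in operators:
--             if current_token:
--                 tokens.append(current_token)
--                 current_token = ""
--
--             tokens.append(char)
--         # If the character is none of the above, add it to the current token
--         else:
--             current_token += char
--
--     # Add the last token to the list of tokens if there is one
--     if current_token:
--         tokens.append(current_token)
--
--     # Classify each token as a keyword, operator, identifier, or literal
--     classified_tokens = []
--     for token in tokens: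
--         if token in keywords:
--             classified_tokens.append((token, "Keyword"))
--         elif token in operators:
--             classified_tokens.append((token, "Operator"))
--         elif token in delimiters:
--             classified_tokens.append((token, "Delimiter"))
--         elif token in header_file:
--             classified_tokens.append((token, "header_file"))
--         elif token in Function:
--             classified_tokens.append((token, "function"))
--
--         elif token.isdigit():
--             classified_tokens.append((token, "Literal"))
--         else:
--             classified_tokens.append((token, "Identifier"))
--
--     return classified_tokens
-- ===== SOURCE B (Python) =====
-- # B: expand-and-split tokenizer + one classification table, instead of A's
-- # char-by-char accumulate-and-flush machine with a seven-way if chain.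
-- _SPECIALS = "(){},;+-*/=<>#"
--
-- _CLASS = {
--     "if": "Keyword", "else": "Keyword", "while": "Keyword", "for": "Keyword",
--     "return": "Keyword", "include": "Keyword", "int": "Keyword", "float": "Keyword",
--     "+": "Operator", "-": "Operator", "*": "Operator", "/": "Operator",
--     "=": "Operator", "==": "Operator", "<": "Operator", ">": "Operator",
--     "<=": "Operator", ">=": "Operator", "#": "Operator",
--     "(": "Delimiter", ")": "Delimiter", "{": "Delimiter", "}": "Delimiter",
--     ",": "Delimiter", ";": "Delimiter",
--     "stdio.h": "header_file",
--     "main": "function", "printf": "function", "scanf": "function",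
-- }
--
-- def analyze_line(line):
--     spaced = "".join(" " + c + " " if c in _SPECIALS else c for c in line)
--     return [(t, _CLASS.get(t, "Literal" if t.isdigit() else "Identifier"))
--             for t in spaced.split()]
-- ===== Notes on version B (the rewrite author's own statement) =====
-- stated objective: idiomatic
-- what changed: A's character-by-character accumulate-and-flush tokenizer plus a seven-way if/elif classification chain is replaced by an expand-then-split tokenizer (pad every delimiter/operator character with spaces, then str.split()) and a single token-to-class dictionary with a digit/identifier fallback.
import Mathlib
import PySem

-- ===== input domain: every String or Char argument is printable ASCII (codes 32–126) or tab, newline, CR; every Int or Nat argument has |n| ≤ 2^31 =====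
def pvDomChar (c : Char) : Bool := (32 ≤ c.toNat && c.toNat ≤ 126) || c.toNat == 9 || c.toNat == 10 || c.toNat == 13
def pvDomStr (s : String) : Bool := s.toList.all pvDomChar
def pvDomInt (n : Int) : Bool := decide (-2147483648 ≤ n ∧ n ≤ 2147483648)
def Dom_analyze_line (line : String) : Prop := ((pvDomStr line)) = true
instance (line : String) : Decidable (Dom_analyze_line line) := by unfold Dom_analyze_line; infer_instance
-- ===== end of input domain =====

-- B replaces A's accumulate-and-flush tokenizer + if-chain classifier by an
-- expand-then-split tokenizer and a single lookup table (idiomatic; same output).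

-- ===== PORT A =====
def pvKeywords : List String := ["if", "else", "while", "for", "return", "include", "int", "float"]
def pvOperators : List String := ["+", "-", "*", "/", "=", "==", "<", ">", "<=", ">=", "#"]
def pvDelimiters : List String := ["(", ")", "{", "}", ",", ";"]
def pvHeaderFile : List String := ["stdio.h"]
def pvFunction : List String := ["main", "printf", "scanf"]

-- 'char in delimiters' / 'char in operators' on a ONE-character string is exactly
-- membership of the char in the single-character entries of those lists:
def pvDelimChars : List Char := ['(', ')', '{', '}', ',', ';']
def pvOpChars : List Char := ['+', '-', '*', '/', '=', '<', '>', '#']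

-- one iteration of A's character loop, state = (tokens, current_token)
def pvStepA (st : List String × List Char) (c : Char) : List String × List Char :=
  if PySem.Chars.isspace c || c ∈ pvDelimChars then
    let toks := if st.2.isEmpty then st.1 else st.1 ++ [String.ofList st.2]
    (if c ∈ pvDelimChars then toks ++ [String.ofList [c]] else toks, [])
  else if c ∈ pvOpChars then
    let toks := if st.2.isEmpty then st.1 else st.1 ++ [String.ofList st.2]
    (toks ++ [String.ofList [c]], [])
  else (st.1, st.2 ++ [c])

def analyze_line (line : String) : List (String × String) :=
  let st := line.toList.foldl pvStepA ([], [])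
  let tokens := if st.2.isEmpty then st.1 else st.1 ++ [String.ofList st.2]
  tokens.foldl (fun acc token =>
    if token ∈ pvKeywords then acc ++ [(token, "Keyword")]
    else if token ∈ pvOperators then acc ++ [(token, "Operator")]
    else if token ∈ pvDelimiters then acc ++ [(token, "Delimiter")]
    else if token ∈ pvHeaderFile then acc ++ [(token, "header_file")]
    else if token ∈ pvFunction then acc ++ [(token, "function")]
    else if PySem.Str.strIsdigit token then acc ++ [(token, "Literal")]
    else acc ++ [(token, "Identifier")]) []

-- ===== PORT B =====
def pvSpecials : List Char := ['(', ')', '{', '}', ',', ';', '+', '-', '*', '/', '=', '<', '>', '#']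

def pvClassDict : PySem.Dict String String := PySem.Dict.ofList
  [("if", "Keyword"), ("else", "Keyword"), ("while", "Keyword"), ("for", "Keyword"),
   ("return", "Keyword"), ("include", "Keyword"), ("int", "Keyword"), ("float", "Keyword"),
   ("+", "Operator"), ("-", "Operator"), ("*", "Operator"), ("/", "Operator"),
   ("=", "Operator"), ("==", "Operator"), ("<", "Operator"), (">", "Operator"),
   ("<=", "Operator"), (">=", "Operator"), ("#", "Operator"),
   ("(", "Delimiter"), (")", "Delimiter"), ("{", "Delimiter"), ("}", "Delimiter"),
   (",", "Delimiter"), (";", "Delimiter"),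
   ("stdio.h", "header_file"),
   ("main", "function"), ("printf", "function"), ("scanf", "function")]

def analyze_line_alt (line : String) : List (String × String) :=
  let spaced := line.toList.flatMap (fun c => if c ∈ pvSpecials then [' ', c, ' '] else [c])
  (PySem.Chars.split₀ spaced).map (fun t =>
    let s := String.ofList t
    (s, (pvClassDict.get? s).getD (if PySem.Chars.strIsdigit t then "Literal" else "Identifier")))

-- ===== PRECONDITION & SPEC =====
def Spec_analyze_line (line : String) (out : List (String × String)) : Prop := out = analyze_line_alt line
instance (line : String) (out : List (String × String)) : Decidable (Spec_analyze_line line out) := by unfold Spec_analyze_line; infer_instance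

-- ===== CLAIM (what is proved, stated in full; the proofs are below) =====
def Claim_equal_analyze_line : Prop := ∀ (line : String), Dom_analyze_line line → Spec_analyze_line line (analyze_line line)

-- ===== LEMMAS AND PROOFS =====

-- unfolding equations for PySem.Chars.split₀.go
lemma pvGo_nil (cur : List Char) (acc : List (List Char)) :
    PySem.Chars.split₀.go [] cur acc
      = if cur.isEmpty then acc.reverse else (cur.reverse :: acc).reverse := rfl

lemma pvGo_cons (c : Char) (cs cur : List Char) (acc : List (List Char)) :
    PySem.Chars.split₀.go (c :: cs) cur acc
      = if PySem.Chars.isspace c then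
          (if cur.isEmpty then PySem.Chars.split₀.go cs [] acc
           else PySem.Chars.split₀.go cs [] (cur.reverse :: acc))
        else PySem.Chars.split₀.go cs (c :: cur) acc := rfl

-- common specification of the token stream (tokens as char lists), mirroring A's branches
def pvSpecT (cur : List Char) : List Char → List (List Char)
  | [] => if cur.isEmpty then [] else [cur]
  | c :: rest =>
    if PySem.Chars.isspace c || c ∈ pvDelimChars then
      (if cur.isEmpty then [] else [cur]) ++ (if c ∈ pvDelimChars then [[c]] else []) ++ pvSpecT [] rest
    else if c ∈ pvOpChars then
      (if cur.isEmpty then [] else [cur]) ++ [[c]] ++ pvSpecT [] rest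
    else pvSpecT (cur ++ [c]) rest

lemma pvSpecial_not_space {c : Char} (h : c ∈ pvSpecials) : PySem.Chars.isspace c = false := by
  simp [pvSpecials] at h
  rcases h with h|h|h|h|h|h|h|h|h|h|h|h|h|h <;> subst h <;> decide

lemma pvSpecial_iff (c : Char) : c ∈ pvSpecials ↔ (c ∈ pvDelimChars ∨ c ∈ pvOpChars) := by
  simp [pvSpecials, pvDelimChars, pvOpChars]; tauto

lemma pvSpace : PySem.Chars.isspace ' ' = true := rfl

-- split₀ of the expanded stream computes pvSpecT
lemma pvGo_expand (cs : List Char) : ∀ (cur : List Char) (acc : List (List Char)),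
    PySem.Chars.split₀.go (cs.flatMap (fun c => if c ∈ pvSpecials then [' ', c, ' '] else [c])) cur acc
      = acc.reverse ++ pvSpecT cur.reverse cs := by
  induction cs with
  | nil =>
    intro cur acc
    rw [List.flatMap_nil, pvGo_nil]
    by_cases h : cur = [] <;> simp [pvSpecT, h]
  | cons c rest ih =>
    intro cur acc
    by_cases hs : c ∈ pvSpecials
    · have hns : PySem.Chars.isspace c = false := pvSpecial_not_space hs
      by_cases hdl : c ∈ pvDelimChars
      · by_cases hc : cur = [] <;>
          simp [List.flatMap_cons, hs, pvGo_cons, hns, pvSpace, ih, pvSpecT, hdl, hc]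
      · have hop : c ∈ pvOpChars := ((pvSpecial_iff c).1 hs).resolve_left hdl
        by_cases hc : cur = [] <;>
          simp [List.flatMap_cons, hs, pvGo_cons, hns, pvSpace, ih, pvSpecT, hdl, hop, hc]
    · have hdl : c ∉ pvDelimChars := fun h => hs ((pvSpecial_iff c).2 (Or.inl h))
      have hop : c ∉ pvOpChars := fun h => hs ((pvSpecial_iff c).2 (Or.inr h))
      by_cases hsp : PySem.Chars.isspace c = true
      · by_cases hc : cur = [] <;>
          simp [List.flatMap_cons, hs, pvGo_cons, hsp, ih, pvSpecT, hdl, hc]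
      · have hsp' : PySem.Chars.isspace c = false := by simpa using hsp
        simp [List.flatMap_cons, hs, pvGo_cons, hsp', ih, pvSpecT, hdl, hop]

-- A's character loop computes pvSpecT too
def pvFlush (st : List String × List Char) : List String :=
  if st.2.isEmpty then st.1 else st.1 ++ [String.ofList st.2]

lemma pvFoldA (cs : List Char) : ∀ (toks : List String) (cur : List Char),
    pvFlush (cs.foldl pvStepA (toks, cur)) = toks ++ (pvSpecT cur cs).map String.ofList := by
  induction cs with
  | nil =>
    intro toks cur
    by_cases h : cur = [] <;> simp [pvFlush, pvSpecT, h]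
  | cons c rest ih =>
    intro toks cur
    by_cases hdl : c ∈ pvDelimChars
    · by_cases hc : cur = []
      · have hstep : pvStepA (toks, cur) c = (toks ++ [String.ofList [c]], []) := by
          simp [pvStepA, hdl, hc]
        rw [List.foldl_cons, hstep, ih]
        simp [pvSpecT, hdl, hc]
      · have hstep : pvStepA (toks, cur) c
            = (toks ++ [String.ofList cur, String.ofList [c]], []) := by
          simp [pvStepA, hdl, hc]
        rw [List.foldl_cons, hstep, ih]
        simp [pvSpecT, hdl, hc]
    · by_cases hsp : PySem.Chars.isspace c = true
      · by_cases hc : cur = []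
        · have hstep : pvStepA (toks, cur) c = (toks, []) := by
            simp [pvStepA, hsp, hdl, hc]
          rw [List.foldl_cons, hstep, ih]
          simp [pvSpecT, hdl, hc, hsp]
        · have hstep : pvStepA (toks, cur) c = (toks ++ [String.ofList cur], []) := by
            simp [pvStepA, hsp, hdl, hc]
          rw [List.foldl_cons, hstep, ih]
          simp [pvSpecT, hdl, hc, hsp]
      · have hsp' : PySem.Chars.isspace c = false := by simpa using hsp
        have h1 : (PySem.Chars.isspace c || decide (c ∈ pvDelimChars)) = false := by
          simp [hsp', hdl]
        by_cases hop : c ∈ pvOpChars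
        · by_cases hc : cur = []
          · have hstep : pvStepA (toks, cur) c = (toks ++ [String.ofList [c]], []) := by
              simp [pvStepA, h1, hop, hc]
            rw [List.foldl_cons, hstep, ih]
            simp [pvSpecT, hdl, hop, hc, hsp']
          · have hstep : pvStepA (toks, cur) c
                = (toks ++ [String.ofList cur, String.ofList [c]], []) := by
              simp [pvStepA, h1, hop, hc]
            rw [List.foldl_cons, hstep, ih]
            simp [pvSpecT, hdl, hop, hc, hsp']
        · have hstep : pvStepA (toks, cur) c = (toks, cur ++ [c]) := by
            simp [pvStepA, h1, hop]
          rw [List.foldl_cons, hstep, ih]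
          simp [pvSpecT, hdl, hop, hsp']

-- A's classification chain, as a function of one token
def pvChain (token : String) : String × String :=
  if token ∈ pvKeywords then (token, "Keyword")
  else if token ∈ pvOperators then (token, "Operator")
  else if token ∈ pvDelimiters then (token, "Delimiter")
  else if token ∈ pvHeaderFile then (token, "header_file")
  else if token ∈ pvFunction then (token, "function")
  else if PySem.Str.strIsdigit token then (token, "Literal")
  else (token, "Identifier")

-- A's second loop is the map of pvChain
lemma pvClassFold (toks : List String) : ∀ (acc : List (String × String)),
    toks.foldl (fun acc token =>
      if token ∈ pvKeywords then acc ++ [(token, "Keyword")]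
      else if token ∈ pvOperators then acc ++ [(token, "Operator")]
      else if token ∈ pvDelimiters then acc ++ [(token, "Delimiter")]
      else if token ∈ pvHeaderFile then acc ++ [(token, "header_file")]
      else if token ∈ pvFunction then acc ++ [(token, "function")]
      else if PySem.Str.strIsdigit token then acc ++ [(token, "Literal")]
      else acc ++ [(token, "Identifier")]) acc
      = acc ++ toks.map pvChain := by
  induction toks with
  | nil => intro acc; simp
  | cons t rest ih =>
    intro acc
    rw [List.foldl_cons, List.map_cons]
    unfold pvChain
    split_ifs <;> rw [ih] <;> simp [pvChain]

-- pointwise: A's classification chain = B's table lookup (for every string)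
lemma pvClassify_eq (t : String) :
    pvChain t
      = (t, (pvClassDict.get? t).getD
          (if PySem.Chars.strIsdigit t.toList then "Literal" else "Identifier")) := by
  by_cases hk : t ∈ pvKeywords
  · simp [pvKeywords] at hk; rcases hk with h|h|h|h|h|h|h|h <;> subst h <;> decide
  by_cases ho : t ∈ pvOperators
  · simp [pvOperators] at ho; rcases ho with h|h|h|h|h|h|h|h|h|h|h <;> subst h <;> decide
  by_cases hd : t ∈ pvDelimiters
  · simp [pvDelimiters] at hd; rcases hd with h|h|h|h|h|h <;> subst h <;> decide
  by_cases hh : t ∈ pvHeaderFile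
  · simp [pvHeaderFile] at hh; subst hh; decide
  by_cases hf : t ∈ pvFunction
  · simp [pvFunction] at hf; rcases hf with h|h|h <;> subst h <;> decide
  have hget : pvClassDict.get? t = none := by
    simp [pvKeywords, pvOperators, pvDelimiters, pvHeaderFile, pvFunction] at hk ho hd hh hf
    have hmk : pvClassDict = PySem.Dict.mk
      [("if", "Keyword"), ("else", "Keyword"), ("while", "Keyword"), ("for", "Keyword"),
       ("return", "Keyword"), ("include", "Keyword"), ("int", "Keyword"), ("float", "Keyword"),
       ("+", "Operator"), ("-", "Operator"), ("*", "Operator"), ("/", "Operator"),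
       ("=", "Operator"), ("==", "Operator"), ("<", "Operator"), (">", "Operator"),
       ("<=", "Operator"), (">=", "Operator"), ("#", "Operator"),
       ("(", "Delimiter"), (")", "Delimiter"), ("{", "Delimiter"), ("}", "Delimiter"),
       (",", "Delimiter"), (";", "Delimiter"),
       ("stdio.h", "header_file"),
       ("main", "function"), ("printf", "function"), ("scanf", "function")] := by decide
    rw [hmk]
    simp only [PySem.Dict.get?_mk_cons, beq_iff_eq]
    simp_all [eq_comm, PySem.Dict.get?]
  unfold pvChain
  rw [hget]
  simp [hk, ho, hd, hh, hf]
  split_ifs <;> rfl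

-- ===== VERDICT (by name: the statement is the Claim_ definition above) =====
theorem analyze_line_spec : Claim_equal_analyze_line := by
  intro line _
  show analyze_line line = analyze_line_alt line
  unfold analyze_line analyze_line_alt
  rw [show PySem.Chars.split₀ = fun s => PySem.Chars.split₀.go s [] [] from rfl]
  simp only [pvGo_expand, List.reverse_nil, List.nil_append]
  rw [show (let st := line.toList.foldl pvStepA ([], [])
        if st.2.isEmpty then st.1 else st.1 ++ [String.ofList st.2])
      = pvFlush (line.toList.foldl pvStepA ([], [])) from rfl]
  rw [pvFoldA, pvClassFold]
  simp [List.map_map, Function.comp, pvClassify_eq]
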